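-- pv_equiv track=rewrite | github.com/dsriva03/dsa-training | arrays_hashing/longestEvenSubstring.py | longestEvenSubstring
-- ===== SOURCE A (Python) =====
-- def longestEvenSubstring(s):
--     n = len(s)
--
--     max_length = 0
--
--     for i in range(n):
--         #create freq array
--         freq = [0] * 26
--         #iterate from i to n
--         for j in range(i, n):
--
--             #populate array
--             char = ord(s[j]) - ord('a')
--             #check if counts are even
--             freq[char] += 1
--             #if even
--             if all(count % 2 == 0 for count in freq):
--                 length = j - i + 1
--                 #if count is larger than max, update max
--                 if length > max_length:
--                     max_length = length
--
--     #return max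
--
--     return max_length
-- ===== SOURCE B (Python) =====
-- def longestEvenSubstring(s):
--     # prefix parity bitmask; first occurrence index of each mask
--     first_seen = {0: -1}
--     mask = 0
--     best = 0
--     for j, ch in enumerate(s):
--         mask ^= 1 << (ord(ch) - ord('a'))
--         if mask in first_seen:
--             d = j - first_seen[mask]
--             if d > best:
--                 best = d
--         else:
--             first_seen[mask] = j
--     return best
-- ===== Notes on version B (the rewrite author's own statement) =====
-- stated objective: faster
-- what changed: Replaced the restart-at-every-i double loop with a 26-slot frequency array by a single pass maintaining a prefix parity bitmask and a dict of each mask's first occurrence index.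
-- outside the precondition, e.g. on longestEvenSubstring('G'): A returns 0, B raises ValueError; on longestEvenSubstring('`'): A returns 0, B raises ValueError; on longestEvenSubstring('GG'): A returns 2, B raises ValueError
import Mathlib
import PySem

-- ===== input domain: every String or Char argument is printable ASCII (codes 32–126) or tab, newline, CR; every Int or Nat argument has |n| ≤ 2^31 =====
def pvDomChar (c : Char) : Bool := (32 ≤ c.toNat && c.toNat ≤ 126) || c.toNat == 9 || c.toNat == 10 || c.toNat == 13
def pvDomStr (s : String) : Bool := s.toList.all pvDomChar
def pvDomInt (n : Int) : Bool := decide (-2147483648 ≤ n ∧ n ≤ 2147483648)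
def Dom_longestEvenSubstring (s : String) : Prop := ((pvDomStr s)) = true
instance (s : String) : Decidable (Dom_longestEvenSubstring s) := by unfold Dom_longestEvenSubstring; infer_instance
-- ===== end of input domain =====

-- B replaces A's restart-at-every-start-index double loop (26-slot count array, full evenness
-- scan per step) by one pass keeping a prefix parity bitmask and a dict of each mask's first
-- occurrence index; objective: faster (asymptotically).


-- ===== PORT A =====
-- Python list item assignment xs[i] = v: a negative index wraps once from the end;
-- an index out of range is an IndexError (excluded by Pre_, where 0 ≤ i < 26 always holds).
def pySetItem (xs : List Int) (i : Int) (v : Int) : List Int :=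
  let k : Int := if i < 0 then i + xs.length else i
  if 0 ≤ k ∧ k < xs.length then xs.set k.toNat v else xs

-- the body of A's inner 'for j in range(i, n)' loop; state = (freq, max_length)
def innerStepA (cs : List Char) (i : Int) (st : List Int × Int) (j : Int) : List Int × Int :=
  let chr : Int := (((PySem.List.pyGet? cs j).getD 'a').toNat : Int) - 97
  let freq := pySetItem st.1 chr (PySem.List.pyGetD st.1 chr 0 + 1)
  if freq.all (fun cnt => PySem.Int.mod cnt 2 == 0) then
    let length := j - i + 1
    if length > st.2 then (freq, length) else (freq, st.2)
  else (freq, st.2)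

def longestEvenSubstring (s : String) : Int :=
  let cs := s.toList
  let n : Int := (cs.length : Int)
  (PySem.List.pyRange 0 n 1).foldl
    (fun maxLength i =>
      ((PySem.List.pyRange i n 1).foldl (innerStepA cs i) (List.replicate 26 0, maxLength)).2) 0

-- ===== PORT B =====
-- state = (first_seen, mask, best); one step per enumerated character
def stepB (st : PySem.Dict Nat Int × Nat × Int) (p : Int × Char) : PySem.Dict Nat Int × Nat × Int :=
  let mask := st.2.1 ^^^ (1 <<< (p.2.toNat - 97))
  match st.1.get? mask with
  | some v => (st.1, mask, if p.1 - v > st.2.2 then p.1 - v else st.2.2)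
  | none => (st.1.insert mask p.1, mask, st.2.2)

def longestEvenSubstring_alt (s : String) : Int :=
  ((PySem.List.enumerate s.toList 0).foldl stepB
    (PySem.Dict.empty.insert 0 (-1), 0, 0)).2.2

-- ===== PRECONDITION & SPEC =====
-- Pre_ admits exactly the lowercase strings 'a'..'z'. Outside: on a character above 'z' or below
-- 'G' A raises IndexError; on characters 'G'..'`' A returns a value only through Python's
-- accidental negative-index wraparound into the 26-slot array (B raises ValueError on the
-- negative shift there), so those inputs are excluded.
def Pre_longestEvenSubstring (s : String) : Prop :=
  s.toList.all (fun c => 97 ≤ c.toNat && c.toNat ≤ 122) = true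
instance (s : String) : Decidable (Pre_longestEvenSubstring s) := by
  unfold Pre_longestEvenSubstring; infer_instance
def pvWitness_longestEvenSubstring : String := "abab"

def Spec_longestEvenSubstring (s : String) (out : Int) : Prop := out = longestEvenSubstring_alt s
instance (s : String) (out : Int) : Decidable (Spec_longestEvenSubstring s out) := by
  unfold Spec_longestEvenSubstring; infer_instance

-- ===== CLAIM (what is proved, stated in full; the proofs are below) =====
def Claim_equal_longestEvenSubstring : Prop := ∀ (s : String), Dom_longestEvenSubstring s → Pre_longestEvenSubstring s → Spec_longestEvenSubstring s (longestEvenSubstring s)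

-- ===== LEMMAS AND PROOFS =====

-- parity machinery: pvBit c = the parity bit of letter c; pvPm l = xor of bits = parity bitmask
def pvBit (c : Char) : Nat := 1 <<< (c.toNat - 97)
def pvPm (l : List Char) : Nat := l.foldl (fun m c => m ^^^ pvBit c) 0
def pvLower (l : List Char) : Prop := ∀ c ∈ l, 97 ≤ c.toNat ∧ c.toNat ≤ 122
def pvCnt (l : List Char) (k : Nat) : Nat := l.countP (fun c => c.toNat == k + 97)
-- the frequency vector A maintains, as a function of the processed segment
def pvFreq (l : List Char) : List Int := (List.range 26).map (fun k => ((pvCnt l k : Nat) : Int))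
-- candidate lengths produced by A's inner loop for start index i from position j on
def pvCand (cs : List Char) (i j : Nat) : List Int :=
  (List.range (cs.length - j)).filterMap (fun t =>
    if pvPm (cs.take i) = pvPm (cs.take (j + t + 1)) then
      some (((j + t + 1 : Nat) : Int) - (i : Int)) else none)
-- first index a ≤ t whose prefix parity mask is m
def pvFO (cs : List Char) (t : Nat) (m : Nat) : Option Nat :=
  (List.range (t + 1)).find? (fun a => pvPm (cs.take a) == m)
def pvFo (cs : List Char) (b : Nat) : Nat := (pvFO cs b (pvPm (cs.take b))).getD b

lemma pvPm_foldl (l : List Char) (m : Nat) :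
    l.foldl (fun m c => m ^^^ pvBit c) m = m ^^^ pvPm l := by
  induction l generalizing m with
  | nil => simp only [List.foldl_nil, pvPm, Nat.xor_zero]
  | cons c t ih =>
    rw [List.foldl_cons, ih]
    have h2 : pvPm (c :: t) = pvBit c ^^^ pvPm t := by
      rw [pvPm, List.foldl_cons, ih, Nat.zero_xor]
    rw [h2, ← Nat.xor_assoc]

lemma pvPm_append (l₁ l₂ : List Char) : pvPm (l₁ ++ l₂) = pvPm l₁ ^^^ pvPm l₂ := by
  rw [pvPm, List.foldl_append, pvPm_foldl]; rfl

lemma xor_eq_self_iff (a x : Nat) : a ^^^ x = a ↔ x = 0 := by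
  constructor
  · intro h
    have h2 : a ^^^ (a ^^^ x) = a ^^^ a := by rw [h]
    simpa [← Nat.xor_assoc, Nat.xor_self, Nat.zero_xor] using h2
  · intro h; simp [h]

lemma testBit_pvBit (c : Char) (hc : 97 ≤ c.toNat) (k : Nat) :
    (pvBit c).testBit k = decide (c.toNat = k + 97) := by
  rw [pvBit, Nat.one_shiftLeft, Nat.testBit_two_pow]
  by_cases h : c.toNat = k + 97 <;> simp [h] <;> omega

lemma testBit_pvPm (l : List Char) (hl : pvLower l) (k : Nat) :
    (pvPm l).testBit k = decide (pvCnt l k % 2 = 1) := by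
  induction l with
  | nil => simp [pvPm, pvCnt]
  | cons c t ih =>
    have hc := hl c (by simp)
    have ht : pvLower t := fun x hx => hl x (List.mem_cons_of_mem _ hx)
    have h2 : pvPm (c :: t) = pvBit c ^^^ pvPm t := by
      rw [pvPm, List.foldl_cons, pvPm_foldl, Nat.zero_xor]
    rw [h2, Nat.testBit_xor, testBit_pvBit c hc.1 k, ih ht]
    by_cases h : c.toNat = k + 97
    · have h3 : pvCnt (c :: t) k = pvCnt t k + 1 := by simp [pvCnt, h]
      rcases Nat.mod_two_eq_zero_or_one (pvCnt t k) with h4 | h4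
      · have h5 : (pvCnt t k + 1) % 2 = 1 := by omega
        simp [h, h3, h4, h5]
      · have h5 : ¬((pvCnt t k + 1) % 2 = 1) := by omega
        simp [h, h3, h4, h5]
    · have h3 : pvCnt (c :: t) k = pvCnt t k := by simp [pvCnt, h]
      simp [h, h3]

lemma pvCnt_eq_zero_of_ge (l : List Char) (hl : pvLower l) (k : Nat) (hk : 26 ≤ k) :
    pvCnt l k = 0 := by
  rw [pvCnt, List.countP_eq_zero]
  intro c hc
  have := hl c hc
  simp only [beq_iff_eq]
  omega

lemma pvPm_eq_zero_iff (l : List Char) (hl : pvLower l) :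
    pvPm l = 0 ↔ ∀ k, pvCnt l k % 2 = 0 := by
  constructor
  · intro h k
    have h1 := testBit_pvPm l hl k
    rw [h, Nat.zero_testBit] at h1
    replace h1 := h1.symm
    simp only [decide_eq_false_iff_not] at h1
    omega
  · intro h
    apply Nat.eq_of_testBit_eq
    intro k
    rw [testBit_pvPm l hl k, Nat.zero_testBit]
    simp only [decide_eq_false_iff_not]
    have := h k
    omega

lemma take_split (cs : List Char) (i b : Nat) (hib : i ≤ b) :
    cs.take b = cs.take i ++ (cs.drop i).take (b - i) := by
  have h : b = i + (b - i) := by omega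
  rw [h, List.take_add]
  simp

lemma pvPm_take_eq_iff (cs : List Char) (hl : pvLower cs) (i b : Nat) (hib : i ≤ b) :
    pvPm (cs.take i) = pvPm (cs.take b) ↔ ∀ k, pvCnt ((cs.drop i).take (b - i)) k % 2 = 0 := by
  have hlseg : pvLower ((cs.drop i).take (b - i)) := fun c hc =>
    hl c (List.drop_subset _ _ (List.take_subset _ _ hc))
  rw [take_split cs i b hib, pvPm_append, eq_comm, xor_eq_self_iff,
    pvPm_eq_zero_iff _ hlseg]

lemma length_pvFreq (l : List Char) : (pvFreq l).length = 26 := by simp [pvFreq]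

lemma pvFreq_nil : pvFreq [] = List.replicate 26 0 := by
  simp [pvFreq, pvCnt, List.map_const']

lemma pvFreq_getElem (l : List Char) (k : Nat) (hk : k < 26) :
    (pvFreq l)[k]'(by rw [length_pvFreq]; exact hk) = (pvCnt l k : Int) := by
  simp [pvFreq]

lemma pvCnt_append_singleton (l : List Char) (c : Char) (k : Nat) :
    pvCnt (l ++ [c]) k = pvCnt l k + (if c.toNat = k + 97 then 1 else 0) := by
  simp [pvCnt, List.countP_append, List.countP_cons]

lemma pvFreq_update (l : List Char) (c : Char) (hc : 97 ≤ c.toNat ∧ c.toNat ≤ 122) :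
    pySetItem (pvFreq l) ((c.toNat : Int) - 97)
      (PySem.List.pyGetD (pvFreq l) ((c.toNat : Int) - 97) 0 + 1) = pvFreq (l ++ [c]) := by
  have hk : ((c.toNat : Int) - 97) = ((c.toNat - 97 : Nat) : Int) := by omega
  set k : Nat := c.toNat - 97 with hkdef
  have hk26 : k < 26 := by omega
  have hget : PySem.List.pyGetD (pvFreq l) ((c.toNat : Int) - 97) 0 = (pvCnt l k : Int) := by
    rw [hk, PySem.List.pyGetD_of_nonneg _ _ (by omega)]
    rw [Int.toNat_natCast, List.getD_eq_getElem _ _ (by rw [length_pvFreq]; exact hk26)]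
    exact pvFreq_getElem l k hk26
  rw [hget, pySetItem]
  have hnn : ¬((k : Int) < 0) := by omega
  simp only [hk, length_pvFreq, if_neg hnn, Int.toNat_natCast]
  rw [if_pos (by constructor <;> omega)]
  apply List.ext_getElem
  · simp [length_pvFreq]
  · intro m hm hm2
    rw [length_pvFreq] at hm2
    rw [List.getElem_set]
    by_cases h : k = m
    · subst h
      rw [if_pos rfl, pvFreq_getElem _ _ hm2, pvCnt_append_singleton]
      rw [if_pos (by omega)]
      push_cast
      ring
    · rw [if_neg h, pvFreq_getElem _ _ hm2, pvFreq_getElem _ _ hm2, pvCnt_append_singleton]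
      rw [if_neg (by omega)]
      simp

lemma allEven_pvFreq (l : List Char) (hl : pvLower l) :
    ((pvFreq l).all (fun cnt => PySem.Int.mod cnt 2 == 0) = true) ↔ ∀ k, pvCnt l k % 2 = 0 := by
  have hmod : ∀ m : Nat, PySem.Int.mod ((m : Nat) : Int) 2 = ((m % 2 : Nat) : Int) := by
    intro m; exact_mod_cast PySem.Int.mod_natCast m 2
  rw [List.all_eq_true]
  constructor
  · intro h k
    by_cases hk : k < 26
    · have h2 := h _ (List.mem_map_of_mem (a := k) (List.mem_range.mpr hk))
      rw [hmod, beq_iff_eq] at h2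
      exact_mod_cast h2
    · rw [pvCnt_eq_zero_of_ge l hl k (by omega)]
  · intro h x hx
    obtain ⟨k, hk, rfl⟩ := List.mem_map.mp hx
    rw [hmod]
    simp [h k]

lemma innerStepA_eq (cs : List Char) (hl : pvLower cs) (i j : Nat) (hij : i ≤ j)
    (hjlt : j < cs.length) (acc : Int) :
    innerStepA cs (i : Int) (pvFreq ((cs.drop i).take (j - i)), acc) ((j : Nat) : Int)
      = (pvFreq ((cs.drop i).take (j + 1 - i)),
         if pvPm (cs.take i) = pvPm (cs.take (j + 1)) then
           max acc (((j + 1 : Nat) : Int) - (i : Int)) else acc) := by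
  unfold innerStepA
  have hget : PySem.List.pyGet? cs ((j : Nat) : Int) = some (cs[j]) := by
    rw [PySem.List.pyGet?_natCast, List.getElem?_eq_getElem hjlt]
  rw [hget]
  simp only [Option.getD_some]
  have hcl := hl cs[j] (List.getElem_mem hjlt)
  rw [pvFreq_update _ _ hcl]
  have hseg : (cs.drop i).take (j - i) ++ [cs[j]] = (cs.drop i).take (j + 1 - i) := by
    have h1 : j + 1 - i = (j - i) + 1 := by omega
    rw [h1, List.take_add_one, List.getElem?_drop]
    have h2 : i + (j - i) = j := by omega
    rw [h2, List.getElem?_eq_getElem hjlt]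
    rfl
  rw [hseg]
  have hlseg : pvLower ((cs.drop i).take (j + 1 - i)) := fun c hc =>
    hl c (List.drop_subset _ _ (List.take_subset _ _ hc))
  have hcond : ((pvFreq ((cs.drop i).take (j + 1 - i))).all
      (fun cnt => PySem.Int.mod cnt 2 == 0) = true)
      ↔ pvPm (cs.take i) = pvPm (cs.take (j + 1)) := by
    rw [allEven_pvFreq _ hlseg, ← pvPm_take_eq_iff cs hl i (j + 1) (by omega)]
  by_cases hP : pvPm (cs.take i) = pvPm (cs.take (j + 1))
  · rw [if_pos (hcond.mpr hP), if_pos hP]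
    have h4 : ((j : Nat) : Int) - (i : Int) + 1 = ((j + 1 : Nat) : Int) - (i : Int) := by
      push_cast; ring
    rw [h4]
    split_ifs with h5
    · rw [max_eq_right (le_of_lt h5)]
    · rw [max_eq_left (not_lt.mp h5)]
  · rw [if_neg (fun hcontra => hP (hcond.mp hcontra)), if_neg hP]

lemma pvCand_nil (cs : List Char) (i : Nat) : pvCand cs i cs.length = [] := by
  simp [pvCand]

lemma pvCand_cons (cs : List Char) (i j : Nat) (hj : j < cs.length) :
    pvCand cs i j
      = (if pvPm (cs.take i) = pvPm (cs.take (j + 1)) then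
          [((j + 1 : Nat) : Int) - (i : Int)] else [])
        ++ pvCand cs i (j + 1) := by
  rw [pvCand]
  have h : cs.length - j = (cs.length - (j + 1)) + 1 := by omega
  rw [h, List.range_succ_eq_map, List.filterMap_cons, List.filterMap_map]
  have h2 : (fun t => (fun t =>
      if pvPm (cs.take i) = pvPm (cs.take (j + t + 1)) then
        some (((j + t + 1 : Nat) : Int) - (i : Int)) else none) (Nat.succ t))
      = (fun t => if pvPm (cs.take i) = pvPm (cs.take (j + 1 + t + 1)) then
        some (((j + 1 + t + 1 : Nat) : Int) - (i : Int)) else none) := by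
    funext t
    have h3 : j + (Nat.succ t) + 1 = j + 1 + t + 1 := by omega
    simp only [Nat.succ_eq_add_one, h3]
  rw [show ((fun t => if pvPm (cs.take i) = pvPm (cs.take (j + t + 1)) then
        some (((j + t + 1 : Nat) : Int) - (i : Int)) else none) ∘ Nat.succ)
      = (fun t => if pvPm (cs.take i) = pvPm (cs.take (j + 1 + t + 1)) then
        some (((j + 1 + t + 1 : Nat) : Int) - (i : Int)) else none) from h2]
  simp only [Nat.add_zero]
  by_cases hP : pvPm (cs.take i) = pvPm (cs.take (j + 1))
  · rw [if_pos hP, if_pos hP]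
    rfl
  · rw [if_neg hP, if_neg hP]
    rfl

lemma innerA_fold (cs : List Char) (hl : pvLower cs) (i : Nat) :
    ∀ (K j : Nat) (acc : Int), i ≤ j → j ≤ cs.length → cs.length - j = K →
    ((PySem.List.pyRange (j : Int) (cs.length : Int) 1).foldl (innerStepA cs (i : Int))
        (pvFreq ((cs.drop i).take (j - i)), acc)).2
      = (pvCand cs i j).foldl max acc := by
  intro K
  induction K with
  | zero =>
    intro j acc hij hjle hK
    have hj' : j = cs.length := by omega
    subst hj'
    rw [PySem.List.pyRange_one_eq_nil (by omega), pvCand_nil]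
    simp
  | succ K ih =>
    intro j acc hij hjle hK
    have hjlt : j < cs.length := by omega
    rw [PySem.List.pyRange_one_cons (by exact_mod_cast hjlt), List.foldl_cons,
      innerStepA_eq cs hl i j hij hjlt acc, pvCand_cons cs i j hjlt]
    have hcast : ((j : Nat) : Int) + 1 = (((j + 1 : Nat)) : Int) := by push_cast; ring
    by_cases hP : pvPm (cs.take i) = pvPm (cs.take (j + 1))
    · rw [if_pos hP, if_pos hP, hcast,
        ih (j + 1) (max acc (((j + 1 : Nat) : Int) - (i : Int))) (by omega) (by omega) (by omega)]
      rfl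
    · rw [if_neg hP, if_neg hP, hcast,
        ih (j + 1) acc (by omega) (by omega) (by omega)]
      rfl

lemma foldl_max_flatMap {α : Type} (L : List α) (f : α → List Int) (acc : Int) :
    L.foldl (fun a x => (f x).foldl max a) acc = (L.flatMap f).foldl max acc := by
  induction L generalizing acc with
  | nil => rfl
  | cons x L ih => simp [List.foldl_append, ih]

lemma A_eq_pairs (s : String) (hl : pvLower s.toList) :
    longestEvenSubstring s
      = ((List.range s.toList.length).flatMap (fun i => pvCand s.toList i i)).foldl max 0 := by
  show ((PySem.List.pyRange 0 ((s.toList.length : Nat) : Int) 1).foldl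
      (fun maxLength i => ((PySem.List.pyRange i ((s.toList.length : Nat) : Int) 1).foldl
        (innerStepA s.toList i) (List.replicate 26 0, maxLength)).2) 0) = _
  rw [PySem.List.pyRange_zero_natCast, List.foldl_map, ← foldl_max_flatMap]
  apply PySem.List.foldl_congr_mem
  intro acc i hi
  have hi' : i < s.toList.length := List.mem_range.mp hi
  have h0 : (List.replicate 26 (0 : Int), acc)
      = (pvFreq ((s.toList.drop i).take (i - i)), acc) := by
    rw [Nat.sub_self, List.take_zero, pvFreq_nil]
  rw [h0, innerA_fold s.toList hl i (s.toList.length - i) i acc (le_refl i) (le_of_lt hi') rfl]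

lemma find?_singleton (x : Nat) (p : Nat → Bool) :
    [x].find? p = if p x then some x else none := by
  cases hp : p x <;> simp [List.find?, hp]

lemma find?_range_spec (p : Nat → Bool) (n a : Nat) (h : (List.range n).find? p = some a) :
    p a = true ∧ a < n ∧ ∀ x, x < a → p x = false := by
  induction n with
  | zero => simp at h
  | succ n ih =>
    rw [List.range_succ, List.find?_append] at h
    cases hf : (List.range n).find? p with
    | some b =>
      rw [hf, Option.some_or] at h
      obtain ⟨h1, h2, h3⟩ := ih (hf.trans (congrArg some (Option.some_inj.mp h)))
      exact ⟨h1, by omega, h3⟩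
    | none =>
      rw [hf, Option.none_or, find?_singleton] at h
      by_cases hp : p n
      · rw [if_pos hp] at h
        obtain rfl := Option.some_inj.mp h
        refine ⟨hp, by omega, fun x hx => ?_⟩
        have := List.find?_eq_none.mp hf x (List.mem_range.mpr hx)
        simpa using this
      · rw [if_neg hp] at h
        exact absurd h (by simp)

lemma find?_range_isSome (p : Nat → Bool) (n b : Nat) (hb : b < n) (hp : p b = true) :
    ((List.range n).find? p).isSome := by
  rw [List.find?_isSome]
  exact ⟨b, List.mem_range.mpr hb, hp⟩

lemma pvFO_self_isSome (cs : List Char) (b : Nat) :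
    (pvFO cs b (pvPm (cs.take b))).isSome := by
  apply find?_range_isSome _ _ b (by omega)
  exact beq_self_eq_true _

lemma pvFo_spec (cs : List Char) (b : Nat) :
    pvPm (cs.take (pvFo cs b)) = pvPm (cs.take b) ∧ pvFo cs b ≤ b ∧
      ∀ x, x < pvFo cs b → pvPm (cs.take x) ≠ pvPm (cs.take b) := by
  have hs := pvFO_self_isSome cs b
  cases hFO : pvFO cs b (pvPm (cs.take b)) with
  | none => rw [hFO] at hs; simp at hs
  | some a =>
    have h := find?_range_spec _ _ _ hFO
    have hfo : pvFo cs b = a := by rw [pvFo, hFO]; rfl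
    rw [hfo]
    refine ⟨by simpa using h.1, by omega, fun x hx hc => ?_⟩
    have := h.2.2 x hx
    simp [hc] at this

lemma pvFo_min (cs : List Char) (b a : Nat)
    (h : pvPm (cs.take a) = pvPm (cs.take b)) : pvFo cs b ≤ a := by
  by_contra hc
  exact (pvFo_spec cs b).2.2 a (by omega) h

lemma pvFO_succ (cs : List Char) (t m : Nat) :
    pvFO cs (t + 1) m
      = (pvFO cs t m).or (if pvPm (cs.take (t + 1)) == m then some (t + 1) else none) := by
  rw [pvFO, List.range_succ, List.find?_append, pvFO, find?_singleton]

def pvGaps (cs : List Char) (t : Nat) : List Int :=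
  (List.range t).map (fun j => (((j + 1 : Nat) : Int) - ((pvFo cs (j + 1) : Nat) : Int)))

lemma B_inv (cs : List Char) (hl : pvLower cs) :
    ∀ t, t ≤ cs.length → ∃ D : PySem.Dict Nat Int,
      ((PySem.List.enumerate (cs.take t) 0).foldl stepB (PySem.Dict.empty.insert 0 (-1), 0, 0))
        = (D, pvPm (cs.take t), (pvGaps cs t).foldl max 0)
      ∧ ∀ m, D.get? m = (pvFO cs t m).map (fun a => ((a : Nat) : Int) - 1) := by
  intro t
  induction t with
  | zero =>
    intro _
    refine ⟨PySem.Dict.empty.insert 0 (-1), rfl, fun m => ?_⟩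
    rw [PySem.Dict.get?_insert, pvFO]
    simp only [Nat.zero_add, List.range_one, find?_singleton]
    have hpm0 : pvPm (List.take 0 cs) = 0 := rfl
    rw [hpm0]
    by_cases h : m = 0
    · subst h
      simp
    · rw [if_neg h, if_neg (by simp; omega), PySem.Dict.get?_empty]
      rfl
  | succ t ih =>
    intro ht
    have htlt : t < cs.length := by omega
    obtain ⟨D, hfold, hD⟩ := ih (by omega)
    have htake : cs.take (t + 1) = cs.take t ++ [cs[t]] := by
      rw [List.take_add_one, List.getElem?_eq_getElem htlt]
      rfl
    have hlen : (cs.take t).length = t := List.length_take_of_le (by omega)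
    have henum : PySem.List.enumerate (cs.take (t + 1)) 0
        = PySem.List.enumerate (cs.take t) 0 ++ [((t : Int), cs[t])] := by
      rw [htake, PySem.List.enumerate_append, hlen, PySem.List.enumerate_cons]
      simp
    rw [henum, List.foldl_append, hfold, List.foldl_cons, List.foldl_nil]
    have hmask : pvPm (cs.take t) ^^^ (1 <<< (cs[t].toNat - 97)) = pvPm (cs.take (t + 1)) := by
      rw [htake, pvPm_append]
      congr 1
      rw [pvPm, List.foldl_cons, List.foldl_nil, Nat.zero_xor, pvBit]
    have hgaps : pvGaps cs (t + 1) = pvGaps cs t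
        ++ [(((t + 1 : Nat) : Int) - ((pvFo cs (t + 1) : Nat) : Int))] := by
      rw [pvGaps, List.range_succ, List.map_append, pvGaps]
      rfl
    have hbest0 : (0 : Int) ≤ (pvGaps cs t).foldl max 0 := (PySem.List.le_foldl_max _ 0).1
    rw [stepB]
    simp only [hmask]
    cases hFO : pvFO cs t (pvPm (cs.take (t + 1))) with
    | some a =>
      have hsp := find?_range_spec _ _ _ hFO
      have hfo1 : pvFO cs (t + 1) (pvPm (cs.take (t + 1))) = some a := by
        rw [pvFO_succ, hFO, Option.some_or]
      have hfo : pvFo cs (t + 1) = a := by rw [pvFo, hfo1]; rfl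
      rw [hD, hFO]
      refine ⟨D, ?_, fun m => ?_⟩
      · simp only [Option.map_some]
        have harith : (t : Int) - (((a : Nat) : Int) - 1) = ((t + 1 : Nat) : Int) - ((a : Nat) : Int) := by
          push_cast; ring
        rw [hgaps, List.foldl_append, hfo]
        simp only [List.foldl_cons, List.foldl_nil, harith, Prod.mk.injEq]
        refine ⟨trivial, trivial, ?_⟩
        split_ifs with h5
        · rw [max_eq_right (le_of_lt h5)]
        · rw [max_eq_left (not_lt.mp h5)]
      · rw [hD, pvFO_succ]
        cases hFm : pvFO cs t m with
        | some b => rfl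
        | none =>
          rw [Option.none_or]
          have hne : ¬(pvPm (cs.take (t + 1)) == m) = true := by
            intro hc
            rw [beq_iff_eq] at hc
            rw [hc, hFm] at hFO
            simp at hFO
          rw [if_neg hne]
    | none =>
      rw [hD, hFO]
      simp only [Option.map_none]
      have hfo1 : pvFO cs (t + 1) (pvPm (cs.take (t + 1))) = some (t + 1) := by
        rw [pvFO_succ, hFO, Option.none_or, if_pos (beq_self_eq_true _)]
      have hfo : pvFo cs (t + 1) = t + 1 := by rw [pvFo, hfo1]; rfl
      refine ⟨D.insert (pvPm (cs.take (t + 1))) (t : Int), ?_, fun m => ?_⟩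
      · rw [hgaps, List.foldl_append, hfo]
        simp only [List.foldl_cons, List.foldl_nil, Prod.mk.injEq]
        refine ⟨trivial, trivial, ?_⟩
        have hz : ((t + 1 : Nat) : Int) - (((t + 1 : Nat) : Nat) : Int) = 0 := by push_cast; ring
        rw [hz, max_eq_left hbest0]
      · rw [PySem.Dict.get?_insert, pvFO_succ, hD]
        by_cases h : m = pvPm (cs.take (t + 1))
        · subst h
          rw [if_pos rfl, hFO, Option.none_or, if_pos (beq_self_eq_true _)]
          simp only [Option.map_some]
          congr 1
          push_cast
          ring
        · rw [if_neg h, if_neg (fun hc => h ((beq_iff_eq.mp hc).symm))]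
          cases hFm : pvFO cs t m <;> rfl

lemma B_eq_gaps (s : String) (hl : pvLower s.toList) :
    longestEvenSubstring_alt s = (pvGaps s.toList s.toList.length).foldl max 0 := by
  obtain ⟨D, hfold, _⟩ := B_inv s.toList hl s.toList.length (le_refl _)
  rw [List.take_of_length_le (le_refl _)] at hfold
  rw [longestEvenSubstring_alt, hfold]

lemma foldl_max_le (l : List Int) : ∀ (a X : Int), a ≤ X → (∀ x ∈ l, x ≤ X) →
    l.foldl max a ≤ X := by
  induction l with
  | nil => intro a X h0 _; exact h0
  | cons x l ih =>
    intro a X h0 h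
    rw [List.foldl_cons]
    exact ih _ _ (max_le h0 (h x (by simp))) (fun y hy => h y (List.mem_cons_of_mem _ hy))

lemma mem_pvCand (cs : List Char) (i j : Nat) (x : Int) :
    x ∈ pvCand cs i j
      ↔ ∃ b : Nat, j < b ∧ b ≤ cs.length ∧ pvPm (cs.take i) = pvPm (cs.take b)
          ∧ x = ((b : Nat) : Int) - (i : Int) := by
  rw [pvCand, List.mem_filterMap]
  constructor
  · rintro ⟨t, ht, hg⟩
    rw [List.mem_range] at ht
    by_cases hP : pvPm (cs.take i) = pvPm (cs.take (j + t + 1))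
    · rw [if_pos hP] at hg
      exact ⟨j + t + 1, by omega, by omega, hP, (Option.some_inj.mp hg).symm⟩
    · rw [if_neg hP] at hg
      exact absurd hg (by simp)
  · rintro ⟨b, hjb, hble, hP, rfl⟩
    refine ⟨b - j - 1, List.mem_range.mpr (by omega), ?_⟩
    have hb : j + (b - j - 1) + 1 = b := by omega
    rw [hb, if_pos hP]

lemma pairs_eq_gaps (cs : List Char) :
    ((List.range cs.length).flatMap (fun i => pvCand cs i i)).foldl max 0
      = (pvGaps cs cs.length).foldl max 0 := by
  apply le_antisymm
  · apply foldl_max_le _ _ _ (PySem.List.le_foldl_max _ 0).1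
    intro x hx
    obtain ⟨i, hi, hx⟩ := List.mem_flatMap.mp hx
    obtain ⟨b, hib, hble, hP, rfl⟩ := (mem_pvCand cs i i x).mp hx
    have hfo : pvFo cs b ≤ i := pvFo_min cs b i hP
    have hgap : (((b - 1) + 1 : Nat) : Int) - ((pvFo cs ((b - 1) + 1) : Nat) : Int)
        ∈ pvGaps cs cs.length := by
      exact List.mem_map_of_mem (List.mem_range.mpr (by omega))
    have hb1 : (b - 1) + 1 = b := by omega
    rw [hb1] at hgap
    have hle := (PySem.List.le_foldl_max (pvGaps cs cs.length) 0).2 _ hgap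
    have : ((b : Nat) : Int) - (i : Int) ≤ ((b : Nat) : Int) - ((pvFo cs b : Nat) : Int) := by
      have := hfo
      omega
    omega
  · apply foldl_max_le _ _ _ (PySem.List.le_foldl_max _ 0).1
    intro x hx
    obtain ⟨j, hj, rfl⟩ := List.mem_map.mp hx
    rw [List.mem_range] at hj
    set b := j + 1 with hbdef
    have hspec := pvFo_spec cs b
    set a := pvFo cs b with hadef
    rcases Nat.lt_or_ge a b with hab | hab
    · have hmem : (((b : Nat) : Int) - (a : Int)) ∈ pvCand cs a a :=
        (mem_pvCand cs a a _).mpr ⟨b, hab, by omega, hspec.1, rfl⟩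
      have hmem2 : (((b : Nat) : Int) - (a : Int))
          ∈ (List.range cs.length).flatMap (fun i => pvCand cs i i) :=
        List.mem_flatMap.mpr ⟨a, List.mem_range.mpr (by omega), hmem⟩
      exact (PySem.List.le_foldl_max _ 0).2 _ hmem2
    · have hab' : a = b := by omega
      have hz : ((b : Nat) : Int) - ((a : Nat) : Int) = 0 := by rw [hab']; ring
      rw [hz]
      exact (PySem.List.le_foldl_max _ 0).1

-- ===== VERDICT (by name: the statement is the Claim_ definition above) =====
theorem longestEvenSubstring_spec : Claim_equal_longestEvenSubstring := by
  intro s _ hpre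
  unfold Spec_longestEvenSubstring
  have hl : pvLower s.toList := by
    intro c hc
    have h := List.all_eq_true.mp hpre c hc
    simp at h
    omega
  rw [A_eq_pairs s hl, B_eq_gaps s hl, pairs_eq_gaps]
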